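-- pv_equiv track=rewrite | github.com/tzonecata/Alarma_MQTT_voice | 07.1_android_app_voice_cmd_mqtt/demo/run_demo.py | build_auto_cycle
-- ===== SOURCE A (Python) =====
-- def build_auto_cycle(
--     broker_sequence: list[str],
--     phone_sequence: list[str],
-- ) -> list[tuple[str, str]]:
--     cycle: list[tuple[str, str]] = []
--     max_items = max(len(broker_sequence), len(phone_sequence))
--     for index in range(max_items):
--         if index < len(broker_sequence):
--             cycle.append(("broker", broker_sequence[index]))
--         if index < len(phone_sequence):
--             cycle.append(("telefon", phone_sequence[index]))
--     return cycle
-- ===== SOURCE B (Python) =====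
-- def build_auto_cycle(
--     broker_sequence: list[str],
--     phone_sequence: list[str],
-- ) -> list[tuple[str, str]]:
--     labeled_broker = [("broker", b) for b in broker_sequence]
--     labeled_phone = [("telefon", p) for p in phone_sequence]
--     cycle: list[tuple[str, str]] = []
--     for b, p in zip(labeled_broker, labeled_phone):
--         cycle.append(b)
--         cycle.append(p)
--     n = min(len(labeled_broker), len(labeled_phone))
--     cycle.extend(labeled_broker[n:])
--     cycle.extend(labeled_phone[n:])
--     return cycle
-- ===== Notes on version B (the rewrite author's own statement) =====
-- stated objective: alternative
-- what changed: B first builds two labeled lists, merges the common prefix with zip in one pass, then appends the leftover labeled tail, instead of A's single loop indexing both raw lists by position with bounds checks.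
import Mathlib
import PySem

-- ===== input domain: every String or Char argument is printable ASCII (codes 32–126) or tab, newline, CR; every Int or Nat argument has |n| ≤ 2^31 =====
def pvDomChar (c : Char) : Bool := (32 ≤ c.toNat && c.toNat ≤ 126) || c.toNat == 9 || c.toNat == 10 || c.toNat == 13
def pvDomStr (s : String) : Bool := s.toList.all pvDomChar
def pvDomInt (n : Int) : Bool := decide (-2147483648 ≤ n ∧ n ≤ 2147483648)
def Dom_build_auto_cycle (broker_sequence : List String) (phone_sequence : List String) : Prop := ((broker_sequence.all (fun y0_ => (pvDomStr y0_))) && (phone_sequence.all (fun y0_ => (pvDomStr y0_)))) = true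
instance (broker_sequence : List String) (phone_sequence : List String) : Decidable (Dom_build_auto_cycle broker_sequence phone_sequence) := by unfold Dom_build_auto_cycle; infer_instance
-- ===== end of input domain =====

-- B labels both sequences first and merges with a zip + leftover tail, instead of A's bounds-checked index loop; alternative decomposition, same O(n) cost.

-- ===== PORT A =====
-- literal port of A: loop over range(max_items), append under each bounds check
def build_auto_cycle (broker_sequence : List String) (phone_sequence : List String) : List (String × String) :=
  let max_items : Int := max (broker_sequence.length : Int) (phone_sequence.length : Int)
  (PySem.List.pyRange 0 max_items 1).foldl (fun cycle index =>
    let cycle := if index < (broker_sequence.length : Int) then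
        cycle ++ [("broker", PySem.List.pyGetD broker_sequence index "")] else cycle
    if index < (phone_sequence.length : Int) then
        cycle ++ [("telefon", PySem.List.pyGetD phone_sequence index "")] else cycle) []

-- ===== PORT B =====
def build_auto_cycle_alt (broker_sequence : List String) (phone_sequence : List String) : List (String × String) :=
  let labeled_broker := broker_sequence.map (fun b => ("broker", b))
  let labeled_phone := phone_sequence.map (fun p => ("telefon", p))
  let cycle := (labeled_broker.zip labeled_phone).foldl (fun c bp => c ++ [bp.1, bp.2]) []
  let n := min labeled_broker.length labeled_phone.length
  cycle ++ labeled_broker.drop n ++ labeled_phone.drop n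

-- ===== PRECONDITION & SPEC =====
def Spec_build_auto_cycle (broker_sequence : List String) (phone_sequence : List String) (out : List (String × String)) : Prop := out = build_auto_cycle_alt broker_sequence phone_sequence
instance (broker_sequence : List String) (phone_sequence : List String) (out : List (String × String)) : Decidable (Spec_build_auto_cycle broker_sequence phone_sequence out) := by unfold Spec_build_auto_cycle; infer_instance

-- ===== CLAIM (what is proved, stated in full; the proofs are below) =====
def Claim_equal_build_auto_cycle : Prop := ∀ (broker_sequence : List String) (phone_sequence : List String), Dom_build_auto_cycle broker_sequence phone_sequence → Spec_build_auto_cycle broker_sequence phone_sequence (build_auto_cycle broker_sequence phone_sequence)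

-- ===== LEMMAS AND PROOFS =====

-- canonical interleaving, the common value of both ports
def pvInter : List String → List String → List (String × String)
  | [], [] => []
  | [], p :: ps => ("telefon", p) :: pvInter [] ps
  | b :: bs, [] => ("broker", b) :: pvInter bs []
  | b :: bs, p :: ps => ("broker", b) :: ("telefon", p) :: pvInter bs ps

-- the per-index contribution of A's loop body
def pvG (bs ps : List String) (i : Int) : List (String × String) :=
  (if i < (bs.length : Int) then [("broker", PySem.List.pyGetD bs i "")] else []) ++
  (if i < (ps.length : Int) then [("telefon", PySem.List.pyGetD ps i "")] else [])

theorem pvA_eq_flatMap (bs ps : List String) :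
    build_auto_cycle bs ps =
      (PySem.List.pyRange 0 (max (bs.length : Int) (ps.length : Int)) 1).flatMap (pvG bs ps) := by
  unfold build_auto_cycle
  have h : (fun (cycle : List (String × String)) (index : Int) =>
      let cycle := if index < (bs.length : Int) then
          cycle ++ [("broker", PySem.List.pyGetD bs index "")] else cycle
      if index < (ps.length : Int) then
          cycle ++ [("telefon", PySem.List.pyGetD ps index "")] else cycle)
      = (fun cycle index => cycle ++ pvG bs ps index) := by
    funext cycle index
    simp only [pvG]
    split_ifs <;> simp
  rw [h, PySem.List.foldl_append_eq_flatMap]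
  simp

theorem pvG_succ (bs ps : List String) (k : ℕ) :
    pvG bs ps (((k + 1 : ℕ)) : Int) = pvG bs.tail ps.tail ((k : ℕ) : Int) := by
  unfold pvG
  congr 1
  · cases bs with
    | nil =>
      rw [if_neg (by simp only [List.length_nil, Int.natCast_zero]; omega),
        if_neg (by simp only [List.tail_nil, List.length_nil, Int.natCast_zero]; omega)]
    | cons x xs =>
      simp only [PySem.List.pyGetD_natCast, List.length_cons, List.tail_cons]
      have hc : (((k + 1 : ℕ) : Int) < ((xs.length + 1 : ℕ) : Int)) ↔ ((k : ℕ) : Int) < (xs.length : Int) := by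
        omega
      rw [if_congr hc rfl rfl]
      simp [List.getD]
  · cases ps with
    | nil =>
      rw [if_neg (by simp only [List.length_nil, Int.natCast_zero]; omega),
        if_neg (by simp only [List.tail_nil, List.length_nil, Int.natCast_zero]; omega)]
    | cons x xs =>
      simp only [PySem.List.pyGetD_natCast, List.length_cons, List.tail_cons]
      have hc : (((k + 1 : ℕ) : Int) < ((xs.length + 1 : ℕ) : Int)) ↔ ((k : ℕ) : Int) < (xs.length : Int) := by
        omega
      rw [if_congr hc rfl rfl]
      simp [List.getD]

theorem pvPeel (bs ps : List String) (hne : bs ≠ [] ∨ ps ≠ [])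
    (ih : (PySem.List.pyRange 0 (max (bs.tail.length : Int) (ps.tail.length : Int)) 1).flatMap
            (pvG bs.tail ps.tail) = pvInter bs.tail ps.tail) :
    (PySem.List.pyRange 0 (max (bs.length : Int) (ps.length : Int)) 1).flatMap (pvG bs ps)
      = pvG bs ps 0 ++ pvInter bs.tail ps.tail := by
  have hlt : (0 : Int) < max (bs.length : Int) (ps.length : Int) := by
    rcases hne with h | h <;> cases bs <;> cases ps <;> simp_all
  rw [PySem.List.pyRange_one_cons hlt]
  simp only [zero_add, List.flatMap_cons]
  rw [PySem.List.pyRange_one] at *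
  simp only [List.flatMap_map, Int.sub_zero, zero_add] at *
  have harg : (fun k : ℕ => pvG bs ps ((1 : Int) + (k : Int)))
      = (fun k : ℕ => pvG bs.tail ps.tail ((k : ℕ) : Int)) := by
    funext k
    rw [show (1 : Int) + (k : Int) = (((k + 1 : ℕ)) : Int) by push_cast; ring]
    exact pvG_succ bs ps k
  have hlen : ((max (bs.length : Int) (ps.length : Int)) - 1).toNat
      = (max (bs.tail.length : Int) (ps.tail.length : Int)).toNat := by
    rcases hne with h | h <;> cases bs <;> cases ps <;> simp_all <;> omega
  rw [harg, hlen, ih]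

theorem pvFlatMap_range_eq_inter (bs ps : List String) :
    (PySem.List.pyRange 0 (max (bs.length : Int) (ps.length : Int)) 1).flatMap (pvG bs ps)
      = pvInter bs ps := by
  fun_induction pvInter bs ps with
  | case1 => simp
  | case2 p ps ih =>
    rw [pvPeel [] (p :: ps) (Or.inr (by simp)) (by simpa using ih)]
    simp [pvG, PySem.List.pyGetD]
  | case3 b bs ih =>
    rw [pvPeel (b :: bs) [] (Or.inl (by simp)) (by simpa using ih)]
    simp [pvG, PySem.List.pyGetD]
  | case4 b bs p ps ih =>
    rw [pvPeel (b :: bs) (p :: ps) (Or.inl (by simp)) (by simpa using ih)]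
    simp [pvG, PySem.List.pyGetD]

theorem pvInter_nil_right (bs : List String) :
    pvInter bs [] = bs.map (fun b => ("broker", b)) := by
  induction bs with
  | nil => simp [pvInter]
  | cons b bs ih => simp [pvInter, ih]

theorem pvInter_nil_left (ps : List String) :
    pvInter [] ps = ps.map (fun p => ("telefon", p)) := by
  induction ps with
  | nil => simp [pvInter]
  | cons p ps ih => simp [pvInter, ih]

theorem pvMerge_eq_inter (bs ps : List String) :
    (((bs.map (fun b => ("broker", b))).zip (ps.map (fun p => ("telefon", p)))).flatMap
        (fun bp => [bp.1, bp.2]))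
      ++ (bs.map (fun b => ("broker", b))).drop (min bs.length ps.length)
      ++ (ps.map (fun p => ("telefon", p))).drop (min bs.length ps.length)
      = pvInter bs ps := by
  induction bs generalizing ps with
  | nil => simp [pvInter_nil_left]
  | cons b bs ih =>
    cases ps with
    | nil => simp [pvInter_nil_right]
    | cons p ps =>
      have := ih ps
      simp only [List.map_cons, List.zip_cons_cons, List.flatMap_cons, List.length_cons,
        Nat.add_min_add_right, List.drop_succ_cons]
      simp only [pvInter, List.cons_append, List.append_assoc] at *
      simp [this]

theorem pvB_eq_inter (bs ps : List String) : build_auto_cycle_alt bs ps = pvInter bs ps := by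
  simp only [build_auto_cycle_alt]
  rw [PySem.List.foldl_append_eq_flatMap]
  simp only [List.length_map, List.nil_append, List.append_assoc] at *
  have := pvMerge_eq_inter bs ps
  simp only [List.append_assoc] at this
  exact this

-- ===== VERDICT (by name: the statement is the Claim_ definition above) =====
theorem build_auto_cycle_spec : Claim_equal_build_auto_cycle := by
  intro bs ps _
  unfold Spec_build_auto_cycle
  rw [pvA_eq_flatMap, pvFlatMap_range_eq_inter, pvB_eq_inter]
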